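-- pv_equiv track=rewrite | github.com/Adirohansuyal/birlaai | utils/symptom_analyzer.py | get_system_category
-- ===== SOURCE A (Python) =====
-- def get_system_category(symptoms):
--     """Determine which body system category the symptoms primarily affect."""
--
--     system_mapping = {
--         "respiratory": ["Cough", "Shortness of breath", "Sore throat", "Runny nose", "Congestion", "Wheezing"],
--         "digestive": ["Nausea", "Vomiting", "Diarrhea", "Constipation", "Abdominal pain", "Bloating"],
--         "cardiovascular": ["Chest pain", "Rapid heartbeat", "Shortness of breath", "Dizziness", "Fatigue"],
--         "neurological": ["Headache", "Dizziness", "Confusion", "Numbness", "Tingling sensation", "Blurred vision"],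
--         "musculoskeletal": ["Muscle pain", "Joint pain", "Back pain", "Weakness"],
--         "mental_health": ["Anxiety", "Depression", "Insomnia", "Fatigue"]
--     }
--
--     symptom_counts = {system: 0 for system in system_mapping}
--
--     for symptom in symptoms:
--         for system, system_symptoms in system_mapping.items():
--             if symptom in system_symptoms:
--                 symptom_counts[system] += 1
--
--     # Find the system with the most matching symptoms
--     if any(count > 0 for count in symptom_counts.values()):
--         primary_system = max(symptom_counts.items(), key=lambda x: x[1])[0]
--         return primary_system
--     else:
--         return "general"
-- ===== SOURCE B (Python) =====
-- def get_system_category(symptoms):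
--     """Determine which body system category the symptoms primarily affect."""
--
--     system_mapping = {
--         "respiratory": ["Cough", "Shortness of breath", "Sore throat", "Runny nose", "Congestion", "Wheezing"],
--         "digestive": ["Nausea", "Vomiting", "Diarrhea", "Constipation", "Abdominal pain", "Bloating"],
--         "cardiovascular": ["Chest pain", "Rapid heartbeat", "Shortness of breath", "Dizziness", "Fatigue"],
--         "neurological": ["Headache", "Dizziness", "Confusion", "Numbness", "Tingling sensation", "Blurred vision"],
--         "musculoskeletal": ["Muscle pain", "Joint pain", "Back pain", "Weakness"],
--         "mental_health": ["Anxiety", "Depression", "Insomnia", "Fatigue"]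
--     }
--
--     # Reverse index built once: symptom name -> list of systems containing it.
--     reverse = {}
--     for system, names in system_mapping.items():
--         for name in names:
--             reverse.setdefault(name, []).append(system)
--
--     # One lookup per input symptom: flat list of every system hit.
--     hits = [sys for s in symptoms for sys in reverse.get(s, [])]
--     if not hits:
--         return "general"
--
--     # Tally the hits (keys seeded in mapping order so max keeps A's tie-breaking).
--     counts = {system: 0 for system in system_mapping}
--     for sys in hits:
--         counts[sys] += 1
--     return max(counts, key=counts.get)
-- ===== Notes on version B (the rewrite author's own statement) =====
-- stated objective: faster
-- what changed: Replaces A's nested scan (every symptom tested for membership in every system's list) by a reverse index symptom->systems built once, a single lookup pass that flattens the matches into a hits list with an early 'general' return when it is empty, and a tally of the hits selected by max over keys.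
import Mathlib
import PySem

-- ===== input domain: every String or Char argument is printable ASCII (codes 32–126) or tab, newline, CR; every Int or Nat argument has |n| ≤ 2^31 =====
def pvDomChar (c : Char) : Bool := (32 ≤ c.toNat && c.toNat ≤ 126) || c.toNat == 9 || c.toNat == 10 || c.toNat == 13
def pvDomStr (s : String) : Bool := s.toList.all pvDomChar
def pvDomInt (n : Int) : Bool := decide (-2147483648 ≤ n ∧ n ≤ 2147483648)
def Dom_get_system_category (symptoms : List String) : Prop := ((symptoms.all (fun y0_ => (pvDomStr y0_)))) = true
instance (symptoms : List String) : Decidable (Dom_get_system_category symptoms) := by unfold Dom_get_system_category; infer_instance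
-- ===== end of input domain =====

-- B replaces A's nested membership scan by a reverse index symptom -> systems built once,
-- a single lookup pass flattening the matches into a hits list (early "general" when empty),
-- and a tally of the hits selected by max over the seeded key order (objective: faster, measured).

-- the shared literal table both Pythons contain verbatim
def pvSyms1 : List String := ["Cough", "Shortness of breath", "Sore throat", "Runny nose", "Congestion", "Wheezing"]
def pvSyms2 : List String := ["Nausea", "Vomiting", "Diarrhea", "Constipation", "Abdominal pain", "Bloating"]
def pvSyms3 : List String := ["Chest pain", "Rapid heartbeat", "Shortness of breath", "Dizziness", "Fatigue"]
def pvSyms4 : List String := ["Headache", "Dizziness", "Confusion", "Numbness", "Tingling sensation", "Blurred vision"]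
def pvSyms5 : List String := ["Muscle pain", "Joint pain", "Back pain", "Weakness"]
def pvSyms6 : List String := ["Anxiety", "Depression", "Insomnia", "Fatigue"]

def pvSystemMapping : List (String × List String) :=
  [("respiratory", pvSyms1), ("digestive", pvSyms2), ("cardiovascular", pvSyms3),
   ("neurological", pvSyms4), ("musculoskeletal", pvSyms5), ("mental_health", pvSyms6)]

-- ===== PORT A =====
def get_system_category (symptoms : List String) : String :=
  let symptom_counts : PySem.Dict String Int :=
    (pvSystemMapping.map (·.1)).foldl (fun d system => d.insert system 0) PySem.Dict.empty
  let symptom_counts :=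
    symptoms.foldl (fun d symptom =>
      pvSystemMapping.foldl (fun d p =>
        if p.2.contains symptom then d.modify p.1 0 (· + 1) else d) d) symptom_counts
  if symptom_counts.values.any (fun c => decide (c > 0)) then
    -- Python's max never raises here: the counts dict always has its 6 entries,
    -- so the getD default is never used
    ((PySem.List.max? symptom_counts.items (fun x => x.2)).getD ("", 0)).1
  else "general"

-- ===== PORT B =====
def get_system_category_alt (symptoms : List String) : String :=
  -- reverse.setdefault(name, []).append(system) is d[name] = d.get(name, []) + [system]
  let reverse : PySem.Dict String (List String) :=
    pvSystemMapping.foldl (fun d p =>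
      p.2.foldl (fun d name => d.modify name [] (· ++ [p.1])) d) PySem.Dict.empty
  let hits := symptoms.flatMap (fun s => reverse.getD s [])
  if hits = [] then "general"
  else
    let counts : PySem.Dict String Int :=
      (pvSystemMapping.map (·.1)).foldl (fun d system => d.insert system 0) PySem.Dict.empty
    let counts := hits.foldl (fun d sys => d.modify sys 0 (· + 1)) counts
    (PySem.List.max? counts.keys (fun k => counts.getD k 0)).getD ""

-- ===== PRECONDITION & SPEC =====
def Spec_get_system_category (symptoms : List String) (out : String) : Prop := out = get_system_category_alt symptoms
instance (symptoms : List String) (out : String) : Decidable (Spec_get_system_category symptoms out) := by unfold Spec_get_system_category; infer_instance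

-- ===== CLAIM (what is proved, stated in full; the proofs are below) =====
def Claim_equal_get_system_category : Prop := ∀ (symptoms : List String), Dom_get_system_category symptoms → Spec_get_system_category symptoms (get_system_category symptoms)

-- ===== LEMMAS AND PROOFS =====

-- a counts dict with the six system keys, in mapping order
def mkC (n1 n2 n3 n4 n5 n6 : Int) : PySem.Dict String Int :=
  PySem.Dict.mk [("respiratory", n1), ("digestive", n2), ("cardiovascular", n3),
                 ("neurological", n4), ("musculoskeletal", n5), ("mental_health", n6)]

-- the systems a single symptom hits, in mapping order (= B's reverse-index lookup)
def hitsOf (s : String) : List String :=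
  (if pvSyms1.contains s then ["respiratory"] else []) ++
  (if pvSyms2.contains s then ["digestive"] else []) ++
  (if pvSyms3.contains s then ["cardiovascular"] else []) ++
  (if pvSyms4.contains s then ["neurological"] else []) ++
  (if pvSyms5.contains s then ["musculoskeletal"] else []) ++
  (if pvSyms6.contains s then ["mental_health"] else [])

-- B's reverse index (a closed term)
def revDict : PySem.Dict String (List String) :=
  pvSystemMapping.foldl (fun d p =>
    p.2.foldl (fun d name => d.modify name [] (· ++ [p.1])) d) PySem.Dict.empty

-- all symptom names of the table, for the case split in revLookup
def pvAllNames : List String :=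
  pvSyms1 ++ pvSyms2 ++ pvSyms3 ++ pvSyms4 ++ pvSyms5 ++ pvSyms6

-- B's reverse-index lookup returns exactly the systems whose list contains s, in mapping order
set_option maxRecDepth 8192 in
set_option maxHeartbeats 4000000 in
lemma revLookup (s : String) : revDict.getD s [] = hitsOf s := by
  by_cases hs : s ∈ pvAllNames
  · fin_cases hs <;> decide
  · have hs' : ∀ k ∈ pvAllNames, (k == s) = false := fun k hk =>
      beq_eq_false_iff_ne.mpr (fun hkk => hs (hkk ▸ hk))
    simp only [pvAllNames, List.mem_append] at hs
    push Not at hs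
    obtain ⟨⟨⟨⟨⟨m1, m2⟩, m3⟩, m4⟩, m5⟩, m6⟩ := hs
    have c1 : pvSyms1.contains s = false := by simpa using m1
    have c2 : pvSyms2.contains s = false := by simpa using m2
    have c3 : pvSyms3.contains s = false := by simpa using m3
    have c4 : pvSyms4.contains s = false := by simpa using m4
    have c5 : pvSyms5.contains s = false := by simpa using m5
    have c6 : pvSyms6.contains s = false := by simpa using m6
    have h : revDict = PySem.Dict.mk
      [("Cough", ["respiratory"]), ("Shortness of breath", ["respiratory", "cardiovascular"]),
       ("Sore throat", ["respiratory"]), ("Runny nose", ["respiratory"]), ("Congestion", ["respiratory"]),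
       ("Wheezing", ["respiratory"]), ("Nausea", ["digestive"]), ("Vomiting", ["digestive"]),
       ("Diarrhea", ["digestive"]), ("Constipation", ["digestive"]), ("Abdominal pain", ["digestive"]),
       ("Bloating", ["digestive"]), ("Chest pain", ["cardiovascular"]), ("Rapid heartbeat", ["cardiovascular"]),
       ("Dizziness", ["cardiovascular", "neurological"]), ("Fatigue", ["cardiovascular", "mental_health"]),
       ("Headache", ["neurological"]), ("Confusion", ["neurological"]), ("Numbness", ["neurological"]),
       ("Tingling sensation", ["neurological"]), ("Blurred vision", ["neurological"]),
       ("Muscle pain", ["musculoskeletal"]), ("Joint pain", ["musculoskeletal"]), ("Back pain", ["musculoskeletal"]),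
       ("Weakness", ["musculoskeletal"]), ("Anxiety", ["mental_health"]), ("Depression", ["mental_health"]),
       ("Insomnia", ["mental_health"])] := by decide
    rw [h]
    simp only [hitsOf, c1, c2, c3, c4, c5, c6, Bool.false_eq_true, if_false, List.append_nil]
    simp [PySem.Dict.getD_eq_get?_getD, PySem.Dict.get?_mk_cons, hs',
      pvAllNames, pvSyms1, pvSyms2, pvSyms3, pvSyms4, pvSyms5, pvSyms6]
    rfl

-- the number of input symptoms belonging to one system's list
def cnt (syms : List String) (symptoms : List String) : Int :=
  symptoms.foldl (fun n s => if syms.contains s then n + 1 else n) 0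

lemma cnt_nonneg (syms symptoms : List String) : 0 ≤ cnt syms symptoms := by
  rw [cnt, PySem.List.foldl_count_if]
  simp only [zero_add]
  exact Int.natCast_nonneg _

-- one symptom's pass over the six systems updates each count independently (A's inner loop)
lemma stepA (s : String) (n1 n2 n3 n4 n5 n6 : Int) :
    pvSystemMapping.foldl (fun d p =>
        if p.2.contains s then d.modify p.1 0 (· + 1) else d) (mkC n1 n2 n3 n4 n5 n6)
    = mkC (if pvSyms1.contains s then n1 + 1 else n1)
          (if pvSyms2.contains s then n2 + 1 else n2)
          (if pvSyms3.contains s then n3 + 1 else n3)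
          (if pvSyms4.contains s then n4 + 1 else n4)
          (if pvSyms5.contains s then n5 + 1 else n5)
          (if pvSyms6.contains s then n6 + 1 else n6) := by
  simp only [pvSystemMapping, List.foldl]
  split_ifs <;> rfl

-- A's whole counting loop is six independent per-system counting folds
lemma countsA (symptoms : List String) : ∀ n1 n2 n3 n4 n5 n6 : Int,
    symptoms.foldl (fun d symptom =>
        pvSystemMapping.foldl (fun d p =>
          if p.2.contains symptom then d.modify p.1 0 (· + 1) else d) d) (mkC n1 n2 n3 n4 n5 n6)
    = mkC (symptoms.foldl (fun n s => if pvSyms1.contains s then n + 1 else n) n1)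
          (symptoms.foldl (fun n s => if pvSyms2.contains s then n + 1 else n) n2)
          (symptoms.foldl (fun n s => if pvSyms3.contains s then n + 1 else n) n3)
          (symptoms.foldl (fun n s => if pvSyms4.contains s then n + 1 else n) n4)
          (symptoms.foldl (fun n s => if pvSyms5.contains s then n + 1 else n) n5)
          (symptoms.foldl (fun n s => if pvSyms6.contains s then n + 1 else n) n6) := by
  induction symptoms with
  | nil => intro n1 n2 n3 n4 n5 n6; rfl
  | cons s rest ih =>
      intro n1 n2 n3 n4 n5 n6
      simp only [List.foldl_cons]
      rw [stepA]
      exact ih _ _ _ _ _ _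

-- one symptom's hits tallied into the counts dict update each count independently (B's tally)
lemma stepB (s : String) (n1 n2 n3 n4 n5 n6 : Int) :
    (hitsOf s).foldl (fun d sys => d.modify sys 0 (· + 1)) (mkC n1 n2 n3 n4 n5 n6)
    = mkC (if pvSyms1.contains s then n1 + 1 else n1)
          (if pvSyms2.contains s then n2 + 1 else n2)
          (if pvSyms3.contains s then n3 + 1 else n3)
          (if pvSyms4.contains s then n4 + 1 else n4)
          (if pvSyms5.contains s then n5 + 1 else n5)
          (if pvSyms6.contains s then n6 + 1 else n6) := by
  simp only [hitsOf]
  split_ifs <;> rfl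

-- B's whole tally loop over the flattened hits equals the same six folds
lemma countsB (symptoms : List String) : ∀ n1 n2 n3 n4 n5 n6 : Int,
    (symptoms.flatMap hitsOf).foldl (fun d sys => d.modify sys 0 (· + 1)) (mkC n1 n2 n3 n4 n5 n6)
    = mkC (symptoms.foldl (fun n s => if pvSyms1.contains s then n + 1 else n) n1)
          (symptoms.foldl (fun n s => if pvSyms2.contains s then n + 1 else n) n2)
          (symptoms.foldl (fun n s => if pvSyms3.contains s then n + 1 else n) n3)
          (symptoms.foldl (fun n s => if pvSyms4.contains s then n + 1 else n) n4)
          (symptoms.foldl (fun n s => if pvSyms5.contains s then n + 1 else n) n5)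
          (symptoms.foldl (fun n s => if pvSyms6.contains s then n + 1 else n) n6) := by
  induction symptoms with
  | nil => intro n1 n2 n3 n4 n5 n6; rfl
  | cons s rest ih =>
      intro n1 n2 n3 n4 n5 n6
      simp only [List.flatMap_cons, List.foldl_append]
      rw [stepB]
      exact ih _ _ _ _ _ _

-- a single symptom hits no system iff all six membership tests fail
lemma hitsOf_nil (s : String) : hitsOf s = [] ↔
    (pvSyms1.contains s = false ∧ pvSyms2.contains s = false ∧ pvSyms3.contains s = false ∧
     pvSyms4.contains s = false ∧ pvSyms5.contains s = false ∧ pvSyms6.contains s = false) := by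
  simp only [hitsOf]
  split_ifs <;> simp_all

lemma cnt_zero_iff (syms symptoms : List String) :
    cnt syms symptoms = 0 ↔ ∀ s ∈ symptoms, syms.contains s = false := by
  rw [cnt, PySem.List.foldl_count_if]
  simp [List.countP_eq_zero]

-- the flattened hits list is empty iff every per-system count stays 0
lemma hits_nil_iff (symptoms : List String) :
    symptoms.flatMap hitsOf = [] ↔
      (cnt pvSyms1 symptoms = 0 ∧ cnt pvSyms2 symptoms = 0 ∧ cnt pvSyms3 symptoms = 0 ∧
       cnt pvSyms4 symptoms = 0 ∧ cnt pvSyms5 symptoms = 0 ∧ cnt pvSyms6 symptoms = 0) := by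
  rw [List.flatMap_eq_nil_iff]
  simp only [cnt_zero_iff, hitsOf_nil, forall_and]

-- A's tail (guard + max over items) on the six counts
def Asel (n1 n2 n3 n4 n5 n6 : Int) : String :=
  if (mkC n1 n2 n3 n4 n5 n6).values.any (fun c => decide (c > 0)) then
    ((PySem.List.max? (mkC n1 n2 n3 n4 n5 n6).items (fun x => x.2)).getD ("", 0)).1
  else "general"

-- B's tail (max over keys) on the six counts
def Bsel (n1 n2 n3 n4 n5 n6 : Int) : String :=
  (PySem.List.max? (mkC n1 n2 n3 n4 n5 n6).keys
    (fun k => (mkC n1 n2 n3 n4 n5 n6).getD k 0)).getD ""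

lemma A_eq (symptoms : List String) :
    get_system_category symptoms
    = Asel (cnt pvSyms1 symptoms) (cnt pvSyms2 symptoms)
           (cnt pvSyms3 symptoms) (cnt pvSyms4 symptoms)
           (cnt pvSyms5 symptoms) (cnt pvSyms6 symptoms) := by
  show (let symptom_counts :=
          symptoms.foldl (fun d symptom =>
            pvSystemMapping.foldl (fun d p =>
              if p.2.contains symptom then d.modify p.1 0 (· + 1) else d) d) (mkC 0 0 0 0 0 0)
        if symptom_counts.values.any (fun c => decide (c > 0)) then
          ((PySem.List.max? symptom_counts.items (fun x => x.2)).getD ("", 0)).1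
        else "general") = _
  simp only [countsA]
  rfl

lemma B_eq (symptoms : List String) :
    get_system_category_alt symptoms
    = if symptoms.flatMap hitsOf = [] then "general"
      else Bsel (cnt pvSyms1 symptoms) (cnt pvSyms2 symptoms)
                (cnt pvSyms3 symptoms) (cnt pvSyms4 symptoms)
                (cnt pvSyms5 symptoms) (cnt pvSyms6 symptoms) := by
  show (let hits := symptoms.flatMap (fun s => revDict.getD s [])
        if hits = [] then "general"
        else
          let counts := hits.foldl (fun d sys => d.modify sys 0 (· + 1)) (mkC 0 0 0 0 0 0)
          (PySem.List.max? counts.keys (fun k => counts.getD k 0)).getD "") = _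
  have hflat : symptoms.flatMap (fun s => revDict.getD s []) = symptoms.flatMap hitsOf := by
    simp only [revLookup]
  simp only [hflat, countsB]
  rfl

-- the two selection tails agree on nonnegative counts not all zero
set_option maxHeartbeats 4000000 in
lemma sel_eq (n1 n2 n3 n4 n5 n6 : Int) (h1 : 0 ≤ n1) (h2 : 0 ≤ n2) (h3 : 0 ≤ n3)
    (h4 : 0 ≤ n4) (h5 : 0 ≤ n5) (h6 : 0 ≤ n6)
    (hne : ¬(n1 = 0 ∧ n2 = 0 ∧ n3 = 0 ∧ n4 = 0 ∧ n5 = 0 ∧ n6 = 0)) :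
    Asel n1 n2 n3 n4 n5 n6 = Bsel n1 n2 n3 n4 n5 n6 := by
  simp only [Asel, Bsel, mkC, PySem.List.max?, PySem.Dict.values, PySem.Dict.keys,
    PySem.Dict.getD, PySem.Dict.get?, List.any, List.foldl, List.map]
  split_ifs <;> simp_all
  all_goals (try (split_ifs <;> (try simp_all) <;> (try omega)))
  all_goals (try (split_ifs <;> (try simp_all) <;> (try omega)))
  all_goals (try (split_ifs <;> (try simp_all) <;> (try omega)))
  all_goals (try (split_ifs <;> (try simp_all) <;> (try omega)))

-- with all counts zero A's guard fails too
lemma Asel_zero : Asel 0 0 0 0 0 0 = "general" := by decide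

-- ===== VERDICT (by name: the statement is the Claim_ definition above) =====
theorem get_system_category_spec : Claim_equal_get_system_category := by
  intro symptoms _
  unfold Spec_get_system_category
  rw [A_eq, B_eq]
  by_cases h : symptoms.flatMap hitsOf = []
  · obtain ⟨e1, e2, e3, e4, e5, e6⟩ := (hits_nil_iff symptoms).mp h
    rw [if_pos h, e1, e2, e3, e4, e5, e6, Asel_zero]
  · rw [if_neg h]
    exact sel_eq _ _ _ _ _ _ (cnt_nonneg _ _) (cnt_nonneg _ _) (cnt_nonneg _ _)
      (cnt_nonneg _ _) (cnt_nonneg _ _) (cnt_nonneg _ _)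
      (fun hz => h ((hits_nil_iff symptoms).mpr hz))
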